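-- pv_equiv track=rewrite | github.com/zhongpei/load_analysis | collector/data_collector.py | _get_cpu_interrupt_distribution
-- ===== SOURCE A (Python) =====
-- from typing import Dict, List, Tuple, Optional
--
-- def _get_cpu_interrupt_distribution(interrupts_data: Dict[str, List[int]]) -> List[int]:
--     """计算每个CPU核心的总中断数"""
--     if not interrupts_data:
--         return []
--
--     # 确定CPU核心数
--     max_cpus = max(len(counts) for counts in interrupts_data.values()) if interrupts_data else 0
--     cpu_totals = [0] * max_cpus
--
--     for cpu_counts in interrupts_data.values():
--         for i, count in enumerate(cpu_counts):
--             if i < len(cpu_totals):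
--                 cpu_totals[i] += count
--
--     return cpu_totals
-- ===== SOURCE B (Python) =====
-- from itertools import zip_longest
-- from typing import Dict, List
--
--
-- def _get_cpu_interrupt_distribution(interrupts_data: Dict[str, List[int]]) -> List[int]:
--     """计算每个CPU核心的总中断数 (column-wise over the padded transpose)."""
--     return [sum(col) for col in zip_longest(*interrupts_data.values(), fillvalue=0)]
-- ===== Notes on version B (the rewrite author's own statement) =====
-- stated objective: idiomatic
-- what changed: Replaces the row-by-row accumulator with its max-length precomputation and bounds guard by a column-wise sum over the zero-padded transpose (itertools.zip_longest), which also makes the empty-dict case fall out for free.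
import Mathlib
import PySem

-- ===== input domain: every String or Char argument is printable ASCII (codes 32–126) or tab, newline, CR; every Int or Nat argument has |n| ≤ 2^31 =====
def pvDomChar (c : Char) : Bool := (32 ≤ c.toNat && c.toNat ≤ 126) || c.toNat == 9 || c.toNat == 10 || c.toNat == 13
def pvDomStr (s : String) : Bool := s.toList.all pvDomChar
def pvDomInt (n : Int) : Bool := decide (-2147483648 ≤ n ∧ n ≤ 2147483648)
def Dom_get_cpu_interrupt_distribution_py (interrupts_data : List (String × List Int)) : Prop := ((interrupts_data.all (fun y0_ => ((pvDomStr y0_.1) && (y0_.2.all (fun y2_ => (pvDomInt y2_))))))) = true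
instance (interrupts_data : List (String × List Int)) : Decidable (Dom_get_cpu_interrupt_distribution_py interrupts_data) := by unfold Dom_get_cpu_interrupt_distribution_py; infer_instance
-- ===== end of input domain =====

-- B replaces A's row-by-row accumulator (with max-length precomputation and bounds guard)
-- by a column-wise sum over the zero-padded transpose (zip_longest); same cost, more idiomatic.

-- ===== PORT A =====
-- inner loop: `for i, count in enumerate(cpu_counts): if i < len(cpu_totals): cpu_totals[i] += count`
-- (the enumerate index is ≥ 0 and, when the guard holds, < len(cpu_totals), so `.toNat` and `getD` are exact)
def pvAInner (cpu_totals : List Int) (cpu_counts : List Int) : List Int :=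
  (PySem.List.enumerate cpu_counts 0).foldl
    (fun t ic =>
      if ic.1 < (t.length : Int) then t.set ic.1.toNat (t.getD ic.1.toNat 0 + ic.2) else t)
    cpu_totals

def get_cpu_interrupt_distribution_py (interrupts_data : List (String × List Int)) : List Int :=
  if interrupts_data = [] then []
  else
    -- max_cpus = max(len(counts) for counts in interrupts_data.values());
    -- the `.getD 0` default is unreachable: the dict is nonempty here, exactly as in the Python guard
    let max_cpus : Int :=
      (PySem.List.max? (interrupts_data.map (fun kv => (kv.2.length : Int))) (fun x => x)).getD 0
    let cpu_totals : List Int := List.replicate max_cpus.toNat 0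
    interrupts_data.foldl (fun t kv => pvAInner t kv.2) cpu_totals

-- ===== PORT B =====
-- [sum(col) for col in zip_longest(*interrupts_data.values(), fillvalue=0)] :
-- zip_longest yields one column per index below the max row length, padding short rows with 0 (getD j 0).
def get_cpu_interrupt_distribution_py_alt (interrupts_data : List (String × List Int)) : List Int :=
  let rows := interrupts_data.map Prod.snd
  let m := rows.foldl (fun a r => max a r.length) 0
  (List.range m).map (fun j => rows.foldl (fun s r => s + r.getD j 0) 0)

-- ===== PRECONDITION & SPEC =====
def Spec_get_cpu_interrupt_distribution_py (interrupts_data : List (String × List Int)) (out : List Int) : Prop := out = get_cpu_interrupt_distribution_py_alt interrupts_data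
instance (interrupts_data : List (String × List Int)) (out : List Int) : Decidable (Spec_get_cpu_interrupt_distribution_py interrupts_data out) := by unfold Spec_get_cpu_interrupt_distribution_py; infer_instance

-- ===== CLAIM (what is proved, stated in full; the proofs are below) =====
def Claim_equal_get_cpu_interrupt_distribution_py : Prop := ∀ (interrupts_data : List (String × List Int)), Dom_get_cpu_interrupt_distribution_py interrupts_data → Spec_get_cpu_interrupt_distribution_py interrupts_data (get_cpu_interrupt_distribution_py interrupts_data)

-- ===== LEMMAS AND PROOFS =====

-- the inner fold preserves the length of the accumulator
theorem pvAInner_go_length (l : List Int) (k : Int) (t : List Int) :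
    ((PySem.List.enumerate l k).foldl
      (fun t ic =>
        if ic.1 < (t.length : Int) then t.set ic.1.toNat (t.getD ic.1.toNat 0 + ic.2) else t)
      t).length = t.length := by
  induction l generalizing k t with
  | nil => simp [PySem.List.enumerate_nil]
  | cons c l ih =>
      simp only [PySem.List.enumerate_cons, List.foldl_cons]
      rw [ih]
      split <;> simp

-- value of the inner fold at any index, for a natural start index k
theorem pvAInner_go_getD (l : List Int) (k : Nat) (t : List Int) (j : Nat) :
    ((PySem.List.enumerate l (k : Int)).foldl
      (fun t ic =>
        if ic.1 < (t.length : Int) then t.set ic.1.toNat (t.getD ic.1.toNat 0 + ic.2) else t)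
      t).getD j 0
    = t.getD j 0 + (if k ≤ j ∧ j < t.length then l.getD (j - k) 0 else 0) := by
  induction l generalizing k t with
  | nil => simp [PySem.List.enumerate_nil]
  | cons c l ih =>
      simp only [PySem.List.enumerate_cons, List.foldl_cons]
      by_cases hk : k < t.length
      · have hguard : ((k : Int) < (t.length : Int)) := by exact_mod_cast hk
        rw [if_pos hguard]
        have hcast : ((k : Int) + 1) = ((k + 1 : Nat) : Int) := by push_cast; ring
        rw [hcast, ih]
        simp only [Int.toNat_natCast, List.length_set]
        by_cases hj : j = k
        · subst hj
          simp [List.getD, hk]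
        · have hset : (t.set k (t.getD k 0 + c)).getD j 0 = t.getD j 0 := by
            simp [List.getD, Ne.symm hj]
          rw [hset]
          by_cases hc : k ≤ j ∧ j < t.length
          · have hc1 : k + 1 ≤ j ∧ j < t.length := ⟨by omega, hc.2⟩
            rw [if_pos hc1, if_pos hc]
            have hjk : j - k = (j - (k + 1)) + 1 := by omega
            rw [hjk, List.getD_cons_succ]
          · have hc1 : ¬ (k + 1 ≤ j ∧ j < t.length) := by omega
            rw [if_neg hc1, if_neg hc]
      · have hguard : ¬ ((k : Int) < (t.length : Int)) := by exact_mod_cast hk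
        rw [if_neg hguard]
        have hcast : ((k : Int) + 1) = ((k + 1 : Nat) : Int) := by push_cast; ring
        rw [hcast, ih]
        have h1 : ¬ (k + 1 ≤ j ∧ j < t.length) := by omega
        have h2 : ¬ (k ≤ j ∧ j < t.length) := by omega
        rw [if_neg h1, if_neg h2]

theorem pvAInner_length (t r : List Int) : (pvAInner t r).length = t.length :=
  pvAInner_go_length r 0 t

theorem pvAInner_getD (t r : List Int) (j : Nat) (hj : j < t.length) :
    (pvAInner t r).getD j 0 = t.getD j 0 + r.getD j 0 := by
  have h := pvAInner_go_getD r 0 t j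
  simpa [pvAInner, hj] using h

theorem pvFoldR_length (d : List (String × List Int)) (t : List Int) :
    (d.foldl (fun t kv => pvAInner t kv.2) t).length = t.length := by
  induction d generalizing t with
  | nil => rfl
  | cons kv d ih => simp [List.foldl_cons, ih, pvAInner_length]

theorem pvFoldR_getD (d : List (String × List Int)) (t : List Int) (j : Nat) (hj : j < t.length) :
    (d.foldl (fun t kv => pvAInner t kv.2) t).getD j 0
    = d.foldl (fun s kv => s + kv.2.getD j 0) (t.getD j 0) := by
  induction d generalizing t with
  | nil => rfl
  | cons kv d ih =>
      simp only [List.foldl_cons]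
      rw [ih _ (by rw [pvAInner_length]; exact hj), pvAInner_getD t kv.2 j hj]

-- the Int running max over the cast lengths is the cast of the Nat running max
theorem pvMax_cast (d : List (String × List Int)) (a : Nat) :
    (d.map (fun kv => ((kv.2.length : Int)))).foldl max (a : Int)
    = ((d.map (fun kv => kv.2.length)).foldl max a : Nat) := by
  induction d generalizing a with
  | nil => rfl
  | cons kv d ih =>
      simp only [List.map_cons, List.foldl_cons]
      rw [show (max (a : Int) (kv.2.length : Int)) = ((max a kv.2.length : Nat) : Int) by
        push_cast; rfl]
      exact ih _

theorem get_cpu_interrupt_distribution_py_spec : Claim_equal_get_cpu_interrupt_distribution_py := by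
  intro d _
  unfold Spec_get_cpu_interrupt_distribution_py
  match d with
  | [] => rfl
  | kv :: rest =>
      unfold get_cpu_interrupt_distribution_py get_cpu_interrupt_distribution_py_alt
      rw [if_neg (by simp)]
      simp only [List.map_cons, PySem.List.max?_id_cons, Option.getD_some]
      have hNat : ((rest.map (fun kv => ((kv.2.length : Int)))).foldl max (kv.2.length : Int)).toNat
          = List.foldl (fun a r => max a r.length) 0 (kv.2 :: rest.map Prod.snd) := by
        rw [pvMax_cast rest kv.2.length, Int.toNat_natCast]
        simp [List.foldl_map]
      rw [hNat]
      set m := List.foldl (fun a r => max a r.length) 0 (kv.2 :: rest.map Prod.snd) with hm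
      apply List.ext_getElem
      · rw [pvFoldR_length]; simp
      · intro j hj1 hj2
        have hjm : j < m := by simpa using hj2
        rw [← List.getD_eq_getElem _ 0 hj1, ← List.getD_eq_getElem _ 0 hj2]
        rw [pvFoldR_getD _ _ j (by simpa using hjm)]
        have hrep : (List.replicate m (0 : Int)).getD j 0 = 0 := by
          simp [List.getD]
        rw [hrep]
        have hrhs : ((List.range m).map
            (fun j => List.foldl (fun s r => s + r.getD j 0) 0 (kv.2 :: rest.map Prod.snd))).getD j 0
            = List.foldl (fun s r => s + r.getD j 0) 0 (kv.2 :: rest.map Prod.snd) := by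
          rw [List.getD_eq_getElem _ 0 (by simpa using hjm)]
          simp
        rw [hrhs]
        simp [List.foldl_map]
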